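-- pv_equiv track=rewrite | github.com/lmc-eu/demo-recommender | preprocessing/utils.py | anonymize_dataset
-- ===== SOURCE A (Python) =====
-- def anonymize_dataset(dataset):
--     """ Change user and item identifiers to a new one.
--     """
--     anonymized_dataset = []
--
--     user_offset2id = []
--     item_offset2id = []
--     user_id2offset = {}
--     item_id2offset = {}
--
--     for interaction in dataset:
--         user_id = interaction['user_id']
--         item_id = interaction['item_id']
--
--         if user_id not in user_id2offset:
--             user_id2offset[user_id] = len(user_offset2id)
--             user_offset2id.append(user_id)
--
--         if item_id not in item_id2offset:
--             item_id2offset[item_id] = len(item_offset2id)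
--             item_offset2id.append(item_id)
--
--         anonymized_dataset.append({
--             'user_id': 'user_{:04}'.format(user_id2offset[user_id]),
--             'item_id': 'item_{:04}'.format(item_id2offset[item_id])
--         })
--
--     return anonymized_dataset
-- ===== SOURCE B (Python) =====
-- def anonymize_dataset(dataset):
--     """ Change user and item identifiers to a new one.
--
--     Rank-by-sort version: record each id's first-occurrence position in one
--     pass, rank the ids by sorting those positions, and label every row with
--     its id's rank (no running counter, no offset lists).
--     """
--     rows = [(r['user_id'], r['item_id']) for r in dataset]
--
--     def ranks(ids):
--         first = {}
--         for pos, v in enumerate(ids):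
--             if v not in first:
--                 first[v] = pos
--         by_first = sorted(first.items(), key=lambda kv: kv[1])
--         return {v: rank for rank, (v, _) in enumerate(by_first)}
--
--     user_rank = ranks([u for u, _ in rows])
--     item_rank = ranks([i for _, i in rows])
--
--     return [{'user_id': 'user_{:04}'.format(user_rank[u]),
--              'item_id': 'item_{:04}'.format(item_rank[i])} for u, i in rows]
-- ===== Notes on version B (the rewrite author's own statement) =====
-- stated objective: alternative
-- what changed: Replaces A's running-counter assignment (offset = current length of a growing offset list, fused with output building) by a rank-by-sort algorithm: one pass records each id's first-occurrence position, the ids are ranked by sorting those positions, and a final map labels every row with its id's rank.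
import Mathlib
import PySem

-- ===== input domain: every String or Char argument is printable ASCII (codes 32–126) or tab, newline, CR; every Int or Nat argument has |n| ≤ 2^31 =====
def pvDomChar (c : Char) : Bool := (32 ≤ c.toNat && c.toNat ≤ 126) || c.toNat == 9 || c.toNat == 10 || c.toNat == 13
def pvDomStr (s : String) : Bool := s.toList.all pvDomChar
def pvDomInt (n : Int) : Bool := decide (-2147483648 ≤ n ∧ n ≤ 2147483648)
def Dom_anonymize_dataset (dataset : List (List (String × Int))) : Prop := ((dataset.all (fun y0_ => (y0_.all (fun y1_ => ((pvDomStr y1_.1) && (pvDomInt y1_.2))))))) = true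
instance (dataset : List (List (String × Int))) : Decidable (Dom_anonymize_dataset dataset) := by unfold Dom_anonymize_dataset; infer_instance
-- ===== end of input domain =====

-- B replaces A's running-counter offset assignment (fused with output building) by a
-- rank-by-sort algorithm: record first-occurrence positions, rank ids by sorting those
-- positions, then label each row (objective: alternative, same order of cost).
-- Neither program mutates its argument; the equivalence is about the return value.

-- ===== PORT A =====
-- interaction['user_id'] : first-match lookup in the association list (dict convention);
-- the .getD 0 default is only reached outside Pre_ (KeyError in Python).
def pvKey (k : String) (interaction : List (String × Int)) : Int :=
  (List.lookup k interaction).getD 0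

-- 'user_{:04}'.format(n) = prefix ++ str(n).zfill(4) (exact for every int; PySem.Str.zfill)
def pvFmt (pre : String) (n : Int) : String :=
  pre ++ PySem.Str.zfill (PySem.Int.toStr n) 4

-- A's loop state: (user_offset2id, item_offset2id, user_id2offset, item_id2offset, anonymized_dataset)
def pvStepA (st : List Int × List Int × PySem.Dict Int Int × PySem.Dict Int Int × List (List (String × String)))
    (interaction : List (String × Int)) :
    List Int × List Int × PySem.Dict Int Int × PySem.Dict Int Int × List (List (String × String)) :=
  let user_id := pvKey "user_id" interaction
  let item_id := pvKey "item_id" interaction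
  let du := if st.2.2.1.contains user_id then st.2.2.1 else st.2.2.1.insert user_id (st.1.length : Int)
  let uL := if st.2.2.1.contains user_id then st.1 else st.1 ++ [user_id]
  let di := if st.2.2.2.1.contains item_id then st.2.2.2.1 else st.2.2.2.1.insert item_id (st.2.1.length : Int)
  let iL := if st.2.2.2.1.contains item_id then st.2.1 else st.2.1 ++ [item_id]
  (uL, iL, du, di,
    st.2.2.2.2 ++ [[("user_id", pvFmt "user_" (du.getD user_id 0)),
                    ("item_id", pvFmt "item_" (di.getD item_id 0))]])

def anonymize_dataset (dataset : List (List (String × Int))) : List (List (String × String)) :=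
  (dataset.foldl pvStepA ([], [], PySem.Dict.empty, PySem.Dict.empty, [])).2.2.2.2

-- ===== PORT B =====
-- ranks(ids): one pass records first-occurrence positions, then the ids are ranked by
-- sorting those positions (stable sort, key = position) and enumerating the result.
def pvRanks (ids : List Int) : PySem.Dict Int Int :=
  let first := (PySem.List.enumerate ids).foldl
      (fun d pv => if d.contains pv.2 then d else d.insert pv.2 pv.1) PySem.Dict.empty
  let byFirst := PySem.List.sorted first.items (fun kv => kv.2) false
  (PySem.List.enumerate byFirst).foldl (fun d rkv => d.insert rkv.2.1 rkv.1) PySem.Dict.empty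

def anonymize_dataset_alt (dataset : List (List (String × Int))) : List (List (String × String)) :=
  let rows := dataset.map (fun r => (pvKey "user_id" r, pvKey "item_id" r))
  let userRank := pvRanks (rows.map (fun p => p.1))
  let itemRank := pvRanks (rows.map (fun p => p.2))
  rows.map (fun ui =>
    [("user_id", pvFmt "user_" (userRank.getD ui.1 0)),
     ("item_id", pvFmt "item_" (itemRank.getD ui.2 0))])

-- ===== PRECONDITION & SPEC =====
-- Pre_ excludes exactly the rows without a 'user_id' or 'item_id' key, on which Python A raises KeyError.
def Pre_anonymize_dataset (dataset : List (List (String × Int))) : Prop :=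
  ∀ interaction ∈ dataset,
    "user_id" ∈ interaction.map Prod.fst ∧ "item_id" ∈ interaction.map Prod.fst
instance (dataset : List (List (String × Int))) : Decidable (Pre_anonymize_dataset dataset) := by
  unfold Pre_anonymize_dataset; infer_instance

def pvWitness_anonymize_dataset : (List (List (String × Int))) :=
  [[("user_id", 3), ("item_id", 7)], [("user_id", 3), ("item_id", 2)]]

def Spec_anonymize_dataset (dataset : List (List (String × Int))) (out : List (List (String × String))) : Prop := out = anonymize_dataset_alt dataset
instance (dataset : List (List (String × Int))) (out : List (List (String × String))) : Decidable (Spec_anonymize_dataset dataset out) := by unfold Spec_anonymize_dataset; infer_instance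

-- ===== CLAIM (what is proved, stated in full; the proofs are below) =====
def Claim_equal_anonymize_dataset : Prop := ∀ (dataset : List (List (String × Int))), Dom_anonymize_dataset dataset → Pre_anonymize_dataset dataset → Spec_anonymize_dataset dataset (anonymize_dataset dataset)

-- ===== LEMMAS AND PROOFS =====

-- the canonical id→rank dict: key = id, value = its index in l
def pvRankDict (l : List Int) : PySem.Dict Int Int :=
  PySem.Dict.mk ((PySem.List.enumerate l).map (fun iv => (iv.2, iv.1)))

lemma pvRankDict_keys (l : List Int) : (pvRankDict l).keys = l := by
  simp [pvRankDict, PySem.Dict.keys, List.map_map, Function.comp_def,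
        PySem.List.map_snd_enumerate]

lemma pvRankDict_size (l : List Int) : (pvRankDict l).size = l.length := by
  simp [pvRankDict, PySem.Dict.size, PySem.List.length_enumerate]

-- A's 'if new then insert at current size' step and build
def pvStepD (d : PySem.Dict Int Int) (v : Int) : PySem.Dict Int Int :=
  if d.contains v then d else d.insert v (d.size : Int)

def pvBuild (d : PySem.Dict Int Int) (vs : List Int) : PySem.Dict Int Int :=
  vs.foldl pvStepD d

lemma pvBuild_cons (d : PySem.Dict Int Int) (v : Int) (vs : List Int) :
    pvBuild d (v :: vs) = pvBuild (pvStepD d v) vs := rfl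

lemma pvRankDict_contains (l : List Int) (v : Int) :
    (pvRankDict l).contains v = decide (v ∈ l) := by
  rw [PySem.Dict.contains_eq_decide_mem_keys, pvRankDict_keys]

lemma pvRankDict_snoc (l : List Int) :
    ∀ v, pvRankDict (l ++ [v])
      = PySem.Dict.mk ((pvRankDict l).items ++ [(v, (l.length : Int))]) := by
  intro v
  simp [pvRankDict, PySem.List.enumerate_append, PySem.List.enumerate_cons,
        PySem.List.enumerate_nil]

lemma pvBuild_rankDict (ids : List Int) :
    ∀ pre : List Int, pre.Nodup →
      pvBuild (pvRankDict pre) ids = pvRankDict (PySem.Set.update pre ids) := by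
  induction ids with
  | nil => intro pre _; rfl
  | cons v ids ih =>
    intro pre hnd
    rw [pvBuild_cons, PySem.Set.update_cons]
    by_cases hv : v ∈ pre
    · have hc : (pvRankDict pre).contains v = true := by
        rw [pvRankDict_contains]; simpa using hv
      have hadd : PySem.Set.add pre v = pre := by
        simp [PySem.Set.add, PySem.Set.contains, hv]
      rw [show pvStepD (pvRankDict pre) v = pvRankDict pre by simp [pvStepD, hc],
          hadd, ih pre hnd]
    · have hc : (pvRankDict pre).contains v = false := by
        rw [pvRankDict_contains]; simpa using hv
      have hins : pvStepD (pvRankDict pre) v = pvRankDict (pre ++ [v]) := by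
        apply PySem.Dict.ext
        rw [pvRankDict_snoc]
        simp [pvStepD, hc, PySem.Dict.items_insert_of_not_contains _ _ hc,
              pvRankDict_size]
      have hadd : PySem.Set.add pre v = pre ++ [v] := by
        simp [PySem.Set.add, PySem.Set.contains, hv]
      have hnd' : (pre ++ [v]).Nodup := by
        simp [List.nodup_append, hnd]
        exact fun a ha h => hv (h ▸ ha)
      rw [hins, hadd, ih (pre ++ [v]) hnd']

-- first pass of B: the dict of first-occurrence positions has Nodup keys and
-- strictly increasing values (insertion order = first-seen order)
lemma pvFirst_inv (ids : List Int) :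
    ∀ (s : Int) (d : PySem.Dict Int Int),
      (∀ q ∈ d.items, q.2 < s) → d.keys.Nodup →
      d.items.Pairwise (fun a b => a.2 < b.2) →
      ((PySem.List.enumerate ids s).foldl
          (fun d pv => if d.contains pv.2 then d else d.insert pv.2 pv.1) d).keys
          = PySem.Set.update d.keys ids ∧
      ((PySem.List.enumerate ids s).foldl
          (fun d pv => if d.contains pv.2 then d else d.insert pv.2 pv.1) d).keys.Nodup ∧
      ((PySem.List.enumerate ids s).foldl
          (fun d pv => if d.contains pv.2 then d else d.insert pv.2 pv.1) d).items.Pairwise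
          (fun a b => a.2 < b.2) := by
  induction ids with
  | nil =>
    intro s d _ hnd hpw
    simp [PySem.List.enumerate_nil, hnd, hpw]
  | cons v ids ih =>
    intro s d hval hnd hpw
    rw [PySem.List.enumerate_cons]
    simp only [List.foldl_cons]
    by_cases hc : d.contains v = true
    · have h1 : (if d.contains v then d else d.insert v s) = d := by simp [hc]
      rw [h1, PySem.Set.update_cons,
          show PySem.Set.add d.keys v = d.keys by
            simp [PySem.Set.add, PySem.Set.contains,
                  (PySem.Dict.contains_iff_mem_keys d v).mp hc]]
      exact ih (s + 1) d (fun q hq => lt_trans (hval q hq) (by omega)) hnd hpw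
    · have hc' : d.contains v = false := by simpa using hc
      have hvk : v ∉ d.keys := fun h => hc ((PySem.Dict.contains_iff_mem_keys d v).mpr h)
      have h1 : (if d.contains v then d else d.insert v s) = d.insert v s := by simp [hc']
      rw [h1, PySem.Set.update_cons,
          show PySem.Set.add d.keys v = d.keys ++ [v] by
            simp [PySem.Set.add, PySem.Set.contains, hvk]]
      have hkeys : (d.insert v s).keys = d.keys ++ [v] :=
        PySem.Dict.keys_insert_of_not_contains _ _ hc'
      have hitems : (d.insert v s).items = d.items ++ [(v, s)] :=
        PySem.Dict.items_insert_of_not_contains _ _ hc'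
      have := ih (s + 1) (d.insert v s)
        (by intro q hq
            rw [hitems] at hq
            rcases List.mem_append.mp hq with h | h
            · exact lt_trans (hval q h) (by omega)
            · simp only [List.mem_singleton] at h
              subst h; omega)
        (by rw [hkeys]
            simp [List.nodup_append, hnd]
            exact fun a ha h => hvk (h ▸ ha))
        (by rw [hitems]
            refine List.pairwise_append.mpr ⟨hpw, by simp, ?_⟩
            intro a ha b hb
            simp only [List.mem_singleton] at hb
            subst hb
            exact hval a ha)
      rw [hkeys] at this
      exact this

-- enumerate commutes with map on the elements
lemma pvEnumerate_map {α β : Type} (f : α → β) (l : List α) :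
    ∀ s : Int, PySem.List.enumerate (l.map f) s
      = (PySem.List.enumerate l s).map (fun iv => (iv.1, f iv.2)) := by
  induction l with
  | nil => intro s; simp [PySem.List.enumerate_nil]
  | cons x l ih =>
    intro s
    simp [PySem.List.enumerate_cons, ih (s + 1)]

-- projecting the key component out of an enumerated items list
lemma pvMapFstEnum {α β : Type} (l : List (α × β)) :
    ∀ s : Int, (PySem.List.enumerate l s).map (fun a => a.2.1) = l.map Prod.fst := by
  induction l with
  | nil => intro s; simp [PySem.List.enumerate_nil]
  | cons x l ih =>
    intro s
    simp only [PySem.List.enumerate_cons, List.map_cons, ih (s + 1)]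

-- the central fact: B's rank-by-sort dict IS A's running-counter dict
lemma pvRanks_eq (ids : List Int) : pvRanks ids = pvBuild PySem.Dict.empty ids := by
  obtain ⟨hkeys, hnd, hpw⟩ :=
    pvFirst_inv ids 0 PySem.Dict.empty (by simp [PySem.Dict.empty])
      (by simp [PySem.Dict.empty, PySem.Dict.keys]) (by simp [PySem.Dict.empty])
  unfold pvRanks
  set F := (PySem.List.enumerate ids).foldl
      (fun d pv => if d.contains pv.2 then d else d.insert pv.2 pv.1) PySem.Dict.empty with hF
  -- the items are already sorted by first position
  have hsorted : PySem.List.sorted F.items (fun kv => kv.2) false = F.items :=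
    PySem.List.sorted_eq_self_of_pairwise F.items (fun kv => kv.2)
      (hpw.imp (fun h => le_of_lt h))
  show List.foldl (fun d rkv => d.insert rkv.2.1 rkv.1) PySem.Dict.empty
      (PySem.List.enumerate (PySem.List.sorted F.items (fun kv => kv.2) false))
    = pvBuild PySem.Dict.empty ids
  rw [hsorted]
  -- F.keys nodup gives fresh distinct keys for the rank-building fold
  have hmapfst : (PySem.List.enumerate F.items 0).map (fun a => a.2.1)
      = F.items.map Prod.fst := pvMapFstEnum F.items 0
  have hfstnd : ((PySem.List.enumerate F.items 0).map (fun a => a.2.1)).Nodup := by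
    rw [hmapfst]; exact hnd
  have hitems := PySem.Dict.items_foldl_insert_fresh
      (l := PySem.List.enumerate F.items 0) (k := fun a => a.2.1) (v := fun a => a.1)
      (d := PySem.Dict.empty) (by intro a _; simp) hfstnd
  apply PySem.Dict.ext
  rw [hitems]
  have hbuild : pvBuild PySem.Dict.empty ids = pvRankDict F.keys := by
    have h0 : (PySem.Dict.empty : PySem.Dict Int Int) = pvRankDict [] := rfl
    rw [h0, pvBuild_rankDict ids [] (by simp)]
    congr 1
    rw [hkeys]; rfl
  rw [hbuild]
  -- both sides are (enumerate F.items).map swapped, since keys = items.map fst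
  have : F.keys = F.items.map Prod.fst := rfl
  rw [pvRankDict, this, pvEnumerate_map]
  simp [PySem.Dict.empty, List.map_map, Function.comp_def]

def pvRow (du di : PySem.Dict Int Int) (interaction : List (String × Int)) :
    List (String × String) :=
  [("user_id", pvFmt "user_" (du.getD (pvKey "user_id" interaction) 0)),
   ("item_id", pvFmt "item_" (di.getD (pvKey "item_id" interaction) 0))]

lemma pvStepD_size (d : PySem.Dict Int Int) (v : Int) (n : Nat) (h : d.size = n) :
    (pvStepD d v).size = if d.contains v then n else n + 1 := by
  unfold pvStepD
  split <;> simp_all [PySem.Dict.size_insert]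

lemma pvStepD_contains_self (d : PySem.Dict Int Int) (v : Int) :
    (pvStepD d v).contains v = true := by
  unfold pvStepD
  split
  · assumption
  · exact PySem.Dict.contains_insert_self d v _

lemma pvStepD_getD (d : PySem.Dict Int Int) (v k : Int) (h : d.contains k = true) :
    (pvStepD d v).getD k 0 = d.getD k 0 := by
  unfold pvStepD
  split
  · rfl
  · next hv =>
    have hne : k ≠ v := fun he => hv (he ▸ h)
    exact PySem.Dict.getD_insert_of_ne d _ _ hne

lemma pvStepD_contains (d : PySem.Dict Int Int) (v k : Int) (h : d.contains k = true) :
    (pvStepD d v).contains k = true := by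
  unfold pvStepD
  split
  · exact h
  · simp [PySem.Dict.contains_insert, h]

lemma pvBuild_getD (vs : List Int) (d : PySem.Dict Int Int) (k : Int)
    (h : d.contains k = true) : (pvBuild d vs).getD k 0 = d.getD k 0 := by
  induction vs generalizing d with
  | nil => rfl
  | cons v vs ih =>
    rw [pvBuild_cons, ih _ (pvStepD_contains d v k h), pvStepD_getD d v k h]

-- main invariant: A's fused loop, started from dicts whose sizes match the offset lists,
-- produces the rows mapped through the FINAL dicts
lemma pvMain (l : List (List (String × Int)))
    (uL iL : List Int) (du di : PySem.Dict Int Int)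
    (acc : List (List (String × String)))
    (hu : du.size = uL.length) (hi : di.size = iL.length) :
    (l.foldl pvStepA (uL, iL, du, di, acc)).2.2.2.2
      = acc ++ l.map (pvRow (pvBuild du (l.map (pvKey "user_id")))
                            (pvBuild di (l.map (pvKey "item_id")))) := by
  induction l generalizing uL iL du di acc with
  | nil => simp
  | cons x l ih =>
    simp only [List.foldl_cons, List.map_cons, pvBuild_cons]
    have hstep : pvStepA (uL, iL, du, di, acc) x
        = ((if du.contains (pvKey "user_id" x) then uL else uL ++ [pvKey "user_id" x]),
           (if di.contains (pvKey "item_id" x) then iL else iL ++ [pvKey "item_id" x]),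
           pvStepD du (pvKey "user_id" x), pvStepD di (pvKey "item_id" x),
           acc ++ [[("user_id", pvFmt "user_" ((pvStepD du (pvKey "user_id" x)).getD (pvKey "user_id" x) 0)),
                    ("item_id", pvFmt "item_" ((pvStepD di (pvKey "item_id" x)).getD (pvKey "item_id" x) 0))]]) := by
      simp only [pvStepA, pvStepD, hu, hi]
    rw [hstep,
        ih _ _ _ _ _
          (by rw [pvStepD_size du _ _ hu]
              by_cases h : du.contains (pvKey "user_id" x) = true <;> simp [h])
          (by rw [pvStepD_size di _ _ hi]
              by_cases h : di.contains (pvKey "item_id" x) = true <;> simp [h])]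
    simp only [pvRow]
    rw [pvBuild_getD _ _ _ (pvStepD_contains_self du _),
        pvBuild_getD _ _ _ (pvStepD_contains_self di _)]
    simp

-- ===== VERDICT (by name: the statement is the Claim_ definition above) =====
theorem anonymize_dataset_spec : Claim_equal_anonymize_dataset := by
  intro dataset _ _
  unfold Spec_anonymize_dataset anonymize_dataset anonymize_dataset_alt
  rw [pvMain dataset [] [] _ _ [] rfl rfl]
  simp only [List.map_map, Function.comp_def, pvRanks_eq]
  simp [pvRow]
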